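-- pv_equiv track=rewrite | github.com/stuartshay/nyc-landmarks-vector-db | nyc_landmarks/utils/correlation.py | extract_correlation_id_from_headers
-- ===== SOURCE A (Python) =====
-- from typing import Optional
--
-- def extract_correlation_id_from_headers(headers: dict) -> Optional[str]:
--     """
--     Extract correlation ID from a dictionary of headers.
--
--     This is a lower-level utility for cases where you have headers
--     as a dictionary rather than a FastAPI Request object.
--
--     Args:
--         headers: Dictionary of HTTP headers (case-insensitive)
--
--     Returns:
--         Correlation ID string if found, None otherwise
--
--     Example:
--         >>> headers = {"X-Request-ID": "session-123", "Content-Type": "application/json"}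
--         >>> correlation_id = extract_correlation_id_from_headers(headers)
--         >>> # correlation_id == "session-123"
--     """
--     # Convert headers to lowercase for case-insensitive matching
--     lower_headers = {k.lower(): v for k, v in headers.items()}
--
--     # Check headers in priority order
--     for header_name in [
--         "x-request-id",
--         "x-correlation-id",
--         "request-id",
--         "correlation-id",
--     ]:
--         if header_name in lower_headers:
--             return str(lower_headers[header_name])
--
--     return None
-- ===== SOURCE B (Python) =====
-- _PRIORITY = {
--     "x-request-id": 0,
--     "x-correlation-id": 1,
--     "request-id": 2,
--     "correlation-id": 3,
-- }
--
--
-- def extract_correlation_id_from_headers(headers):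
--     """Single pass over the headers, tracking the best-priority match seen."""
--     best = None  # (rank, value) of the best match so far
--     for key, value in headers.items():
--         rank = _PRIORITY.get(key.lower())
--         if rank is not None and (best is None or rank <= best[0]):
--             best = (rank, value)
--     return str(best[1]) if best is not None else None
-- ===== Notes on version B (the rewrite author's own statement) =====
-- stated objective: alternative
-- what changed: Replaces A's lowered-key index dict plus four priority-order lookups by a single pass over the headers that tracks the (rank, value) of the best-priority match via a priority-rank table.
import Mathlib
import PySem

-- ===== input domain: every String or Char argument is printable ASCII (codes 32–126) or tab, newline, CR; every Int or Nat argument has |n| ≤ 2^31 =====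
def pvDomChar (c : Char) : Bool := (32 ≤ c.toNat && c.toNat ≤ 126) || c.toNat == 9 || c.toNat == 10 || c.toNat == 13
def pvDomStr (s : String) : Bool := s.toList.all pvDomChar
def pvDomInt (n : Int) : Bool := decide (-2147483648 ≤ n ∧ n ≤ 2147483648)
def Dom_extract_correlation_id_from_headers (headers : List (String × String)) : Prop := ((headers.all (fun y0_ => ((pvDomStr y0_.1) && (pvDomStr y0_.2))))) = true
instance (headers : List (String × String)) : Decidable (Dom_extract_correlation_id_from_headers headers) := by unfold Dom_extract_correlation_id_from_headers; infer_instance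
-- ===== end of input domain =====

-- B replaces A's lowered-key dict plus priority-order lookups by a single pass over the
-- headers that tracks the best-priority match (same values, no speed claim).

-- ===== PORT A =====
-- A's priority loop over the lowered-key dict
def pvAfind (d : PySem.Dict String String) : List String → Option String
  | [] => none
  | n :: rest => if d.contains n then d.get? n else pvAfind d rest

def extract_correlation_id_from_headers (headers : List (String × String)) : Option String :=
  -- lower_headers = {k.lower(): v for k, v in headers.items()}
  let lower_headers := headers.foldl (fun d p => d.insert (PySem.Str.lower p.1) p.2) PySem.Dict.empty
  pvAfind lower_headers ["x-request-id", "x-correlation-id", "request-id", "correlation-id"]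

-- ===== PORT B =====
-- _PRIORITY = {...}
def pvPriority : PySem.Dict String Int :=
  ((((PySem.Dict.empty.insert "x-request-id" 0).insert "x-correlation-id" 1).insert
      "request-id" 2).insert "correlation-id" 3)

-- one loop iteration: update best = (rank, value) of the best-priority match so far
def pvStep (best : Option (Int × String)) (p : String × String) : Option (Int × String) :=
  match pvPriority.get? (PySem.Str.lower p.1) with
  | none => best
  | some rank =>
      match best with
      | none => some (rank, p.2)
      | some b => if rank ≤ b.1 then some (rank, p.2) else best

def extract_correlation_id_from_headers_alt (headers : List (String × String)) : Option String :=
  match headers.foldl pvStep none with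
  | some b => some b.2
  | none => none

-- ===== PRECONDITION & SPEC =====
def Spec_extract_correlation_id_from_headers (headers : List (String × String)) (out : Option String) : Prop := out = extract_correlation_id_from_headers_alt headers
instance (headers : List (String × String)) (out : Option String) : Decidable (Spec_extract_correlation_id_from_headers headers out) := by unfold Spec_extract_correlation_id_from_headers; infer_instance

-- ===== CLAIM (what is proved, stated in full; the proofs are below) =====
def Claim_equal_extract_correlation_id_from_headers : Prop := ∀ (headers : List (String × String)), Dom_extract_correlation_id_from_headers headers → Spec_extract_correlation_id_from_headers headers (extract_correlation_id_from_headers headers)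

-- ===== LEMMAS AND PROOFS =====

-- last value whose lowered key equals n (proof-side characterisation both sides reduce to)
def pvScan (hs : List (String × String)) (n : String) : Option String :=
  hs.foldl (fun acc p => if PySem.Str.lower p.1 == n then some p.2 else acc) none

-- the value B's fold maintains, expressed through the four scans
def pvBest (hs : List (String × String)) : Option (Int × String) :=
  match pvScan hs "x-request-id" with
  | some v => some (0, v)
  | none => match pvScan hs "x-correlation-id" with
    | some v => some (1, v)
    | none => match pvScan hs "request-id" with
      | some v => some (2, v)
      | none => match pvScan hs "correlation-id" with
        | some v => some (3, v)
        | none => none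

theorem pvScan_append (hs : List (String × String)) (p : String × String) (n : String) :
    pvScan (hs ++ [p]) n = if PySem.Str.lower p.1 == n then some p.2 else pvScan hs n := by
  simp [pvScan, List.foldl_append]

-- the lowered-key dict's lookup is exactly the last-match scan (generalized accumulator)
theorem pv_get?_foldl (hs : List (String × String)) (d : PySem.Dict String String) (n : String) :
    (hs.foldl (fun d p => d.insert (PySem.Str.lower p.1) p.2) d).get? n
      = hs.foldl (fun acc p => if PySem.Str.lower p.1 == n then some p.2 else acc) (d.get? n) := by
  induction hs generalizing d with
  | nil => rfl
  | cons p rest ih =>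
      simp only [List.foldl_cons, ih, PySem.Dict.get?_insert]
      congr 1
      by_cases h : PySem.Str.lower p.1 = n
      · simp [h]
      · simp [h, Ne.symm h]

theorem pv_scan_eq (hs : List (String × String)) (n : String) :
    (hs.foldl (fun d p => d.insert (PySem.Str.lower p.1) p.2) PySem.Dict.empty).get? n
      = pvScan hs n := by
  simpa [pvScan] using pv_get?_foldl hs PySem.Dict.empty n


theorem pvPriority_r0 : pvPriority.get? "x-request-id" = some 0 := by decide
theorem pvPriority_r1 : pvPriority.get? "x-correlation-id" = some 1 := by decide
theorem pvPriority_r2 : pvPriority.get? "request-id" = some 2 := by decide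
theorem pvPriority_r3 : pvPriority.get? "correlation-id" = some 3 := by decide

-- B's fold invariant
theorem pv_foldl_step (hs : List (String × String)) :
    hs.foldl pvStep none = pvBest hs := by
  induction hs using List.reverseRecOn with
  | nil => rfl
  | append_singleton hs p ih =>
      rw [List.foldl_append, List.foldl_cons, List.foldl_nil, ih]
      by_cases h0 : PySem.Str.lower p.1 = "x-request-id"
      · rcases e0 : pvScan hs "x-request-id" with _ | v0 <;>
        rcases e1 : pvScan hs "x-correlation-id" with _ | v1 <;>
        rcases e2 : pvScan hs "request-id" with _ | v2 <;>
        rcases e3 : pvScan hs "correlation-id" with _ | v3 <;>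
          simp [pvBest, pvStep, pvScan_append, h0, pvPriority_r0, e0, e1, e2, e3]
      · by_cases h1 : PySem.Str.lower p.1 = "x-correlation-id"
        · rcases e0 : pvScan hs "x-request-id" with _ | v0 <;>
          rcases e1 : pvScan hs "x-correlation-id" with _ | v1 <;>
          rcases e2 : pvScan hs "request-id" with _ | v2 <;>
          rcases e3 : pvScan hs "correlation-id" with _ | v3 <;>
            simp [pvBest, pvStep, pvScan_append, h1, pvPriority_r1, e0, e1, e2, e3]
        · by_cases h2 : PySem.Str.lower p.1 = "request-id"
          · rcases e0 : pvScan hs "x-request-id" with _ | v0 <;>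
            rcases e1 : pvScan hs "x-correlation-id" with _ | v1 <;>
            rcases e2 : pvScan hs "request-id" with _ | v2 <;>
            rcases e3 : pvScan hs "correlation-id" with _ | v3 <;>
              simp [pvBest, pvStep, pvScan_append, h2, pvPriority_r2, e0, e1, e2, e3]
          · by_cases h3 : PySem.Str.lower p.1 = "correlation-id"
            · rcases e0 : pvScan hs "x-request-id" with _ | v0 <;>
              rcases e1 : pvScan hs "x-correlation-id" with _ | v1 <;>
              rcases e2 : pvScan hs "request-id" with _ | v2 <;>
              rcases e3 : pvScan hs "correlation-id" with _ | v3 <;>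
                simp [pvBest, pvStep, pvScan_append, h3, pvPriority_r3, e0, e1, e2, e3]
            · have hr : pvPriority.get? (PySem.Str.lower p.1) = none := by
                simp [pvPriority, PySem.Dict.get?_insert, h0, h1, h2, h3]
              simp [pvBest, pvStep, pvScan_append, h0, h1, h2, h3, hr]

-- ===== VERDICT (by name: the statement is the Claim_ definition above) =====
theorem extract_correlation_id_from_headers_spec : Claim_equal_extract_correlation_id_from_headers := by
  intro headers _
  unfold Spec_extract_correlation_id_from_headers extract_correlation_id_from_headers extract_correlation_id_from_headers_alt
  rw [pv_foldl_step]
  simp only [pvAfind, PySem.Dict.contains_eq_isSome_get?, pv_scan_eq]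
  rcases e0 : pvScan headers "x-request-id" with _ | v0 <;>
  rcases e1 : pvScan headers "x-correlation-id" with _ | v1 <;>
  rcases e2 : pvScan headers "request-id" with _ | v2 <;>
  rcases e3 : pvScan headers "correlation-id" with _ | v3 <;>
    simp [pvBest, e0, e1, e2, e3]
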